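-- pv_equiv track=rewrite | github.com/CTStudyGroup/BOJ | _youn/boj_15661.py | getAbility
-- ===== SOURCE A (Python) =====
-- def getAbility(visited, S, N):
--     teamS, teamL = 0, 0
--     for i in range(N):
--         for j in range(i+1, N):
--             if visited[i] and visited[j]:
--                 teamS += (S[i][j] + S[j][i])
--             elif not visited[i] and not visited[j]:
--                 teamL += (S[i][j] + S[j][i])
--     return abs(teamS-teamL)
-- ===== SOURCE B (Python) =====
-- def _pair_sum(S, members):
--     total = 0
--     rest = members
--     while rest:
--         a, rest = rest[0], rest[1:]
--         for b in rest:
--             total += S[a][b] + S[b][a]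
--     return total
--
--
-- def getAbility(visited, S, N):
--     team_in = [i for i in range(N) if visited[i]]
--     team_out = [i for i in range(N) if not visited[i]]
--     return abs(_pair_sum(S, team_in) - _pair_sum(S, team_out))
-- ===== Notes on version B (the rewrite author's own statement) =====
-- stated objective: alternative
-- what changed: B first partitions the indices into the two team lists in one pass, then sums S[a][b]+S[b][a] over ordered pairs within each list separately, replacing A's single pair loop with a per-pair membership branch; no cross-team pair is ever visited.
-- outside the precondition, e.g. on getAbility([], [[0]], 1): A returns 0, B raises IndexError; on getAbility([True, False], [[0]], 2): A returns 0, B returns 0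
import Mathlib
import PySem

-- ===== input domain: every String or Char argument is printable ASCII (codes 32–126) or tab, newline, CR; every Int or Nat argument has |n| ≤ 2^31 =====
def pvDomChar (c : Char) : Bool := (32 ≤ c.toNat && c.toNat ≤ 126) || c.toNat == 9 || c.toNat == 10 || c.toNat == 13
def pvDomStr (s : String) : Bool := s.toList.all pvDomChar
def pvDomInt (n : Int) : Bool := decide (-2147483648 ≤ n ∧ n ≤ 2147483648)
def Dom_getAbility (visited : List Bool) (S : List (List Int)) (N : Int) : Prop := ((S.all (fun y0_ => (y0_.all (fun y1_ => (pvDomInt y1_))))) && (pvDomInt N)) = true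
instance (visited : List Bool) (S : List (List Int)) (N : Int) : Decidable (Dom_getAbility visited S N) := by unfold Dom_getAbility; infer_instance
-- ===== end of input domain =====

-- B partitions the indices into the two team lists first, then sums within each list; no per-pair membership branch and no cross-team pairs (objective: alternative decomposition, same asymptotic cost).

-- ===== PORT A =====
def getAbility (visited : List Bool) (S : List (List Int)) (N : Int) : Int :=
  let st := (PySem.List.pyRange 0 N 1).foldl (fun (st : Int × Int) i =>
    (PySem.List.pyRange (i + 1) N 1).foldl (fun (st : Int × Int) j =>
      if PySem.List.pyGetD visited i false && PySem.List.pyGetD visited j false then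
        (st.1 + (PySem.List.pyGetD (PySem.List.pyGetD S i []) j 0 + PySem.List.pyGetD (PySem.List.pyGetD S j []) i 0), st.2)
      else if !PySem.List.pyGetD visited i false && !PySem.List.pyGetD visited j false then
        (st.1, st.2 + (PySem.List.pyGetD (PySem.List.pyGetD S i []) j 0 + PySem.List.pyGetD (PySem.List.pyGetD S j []) i 0))
      else st) st) (0, 0)
  |st.1 - st.2|

-- ===== PORT B =====
-- transliteration of Source B's _pair_sum: peel the head, add its row against the remaining members, recurse
def pvPairSum (S : List (List Int)) : Int → List Int → Int
  | total, [] => total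
  | total, a :: rest =>
      pvPairSum S
        (rest.foldl (fun t b =>
          t + (PySem.List.pyGetD (PySem.List.pyGetD S a []) b 0 + PySem.List.pyGetD (PySem.List.pyGetD S b []) a 0)) total)
        rest

def getAbility_alt (visited : List Bool) (S : List (List Int)) (N : Int) : Int :=
  let teamIn := (PySem.List.pyRange 0 N 1).filter (fun i => PySem.List.pyGetD visited i false)
  let teamOut := (PySem.List.pyRange 0 N 1).filter (fun i => !PySem.List.pyGetD visited i false)
  |pvPairSum S 0 teamIn - pvPairSum S 0 teamOut|

-- ===== PRECONDITION & SPEC =====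
-- Pre_ restricts to inputs where the matrix covers all N×N entries and visited has at least N
-- entries; on ragged/short inputs A may raise IndexError (whether it does depends on the team
-- pattern, so a few such inputs on which A still returns are also excluded).
def Pre_getAbility (visited : List Bool) (S : List (List Int)) (N : Int) : Prop :=
  N ≤ (visited.length : Int) ∧ N ≤ (S.length : Int) ∧ ∀ row ∈ S.take N.toNat, N ≤ (row.length : Int)
instance (visited : List Bool) (S : List (List Int)) (N : Int) : Decidable (Pre_getAbility visited S N) := by unfold Pre_getAbility; infer_instance

def pvWitness_getAbility : List Bool × List (List Int) × Int :=
  ([true, false, true], [[0, 1, 2], [3, 4, 5], [6, 7, 8]], 3)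

def Spec_getAbility (visited : List Bool) (S : List (List Int)) (N : Int) (out : Int) : Prop := out = getAbility_alt visited S N
instance (visited : List Bool) (S : List (List Int)) (N : Int) (out : Int) : Decidable (Spec_getAbility visited S N out) := by unfold Spec_getAbility; infer_instance

-- ===== CLAIM (what is proved, stated in full; the proofs are below) =====
def Claim_equal_getAbility : Prop := ∀ (visited : List Bool) (S : List (List Int)) (N : Int), Dom_getAbility visited S N → Pre_getAbility visited S N → Spec_getAbility visited S N (getAbility visited S N)

-- ===== LEMMAS AND PROOFS =====

-- the mathematical sum both ports compute: head paired with every later member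
def pvSpecSum (f : Int → Int → Int) : List Int → Int
  | [] => 0
  | a :: rest => (rest.map (f a)).sum + pvSpecSum f rest

theorem pv_foldl_add (f : Int → Int) (l : List Int) (init : Int) :
    l.foldl (fun t b => t + f b) init = init + (l.map f).sum := by
  induction l generalizing init with
  | nil => simp
  | cons a l ih => simp [List.foldl_cons, ih]; ring

theorem pv_pairSum_eq (S : List (List Int)) (l : List Int) (t : Int) :
    pvPairSum S t l = t + pvSpecSum
      (fun a b => PySem.List.pyGetD (PySem.List.pyGetD S a []) b 0 + PySem.List.pyGetD (PySem.List.pyGetD S b []) a 0) l := by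
  induction l generalizing t with
  | nil => simp [pvPairSum, pvSpecSum]
  | cons a rest ih => simp [pvPairSum, pvSpecSum, ih, pv_foldl_add]; ring

theorem pv_innerA (p : Int → Bool) (f : Int → Int → Int) (i : Int) (l : List Int) (s t : Int) :
    l.foldl (fun (st : Int × Int) j =>
        if p i && p j then (st.1 + f i j, st.2)
        else if !p i && !p j then (st.1, st.2 + f i j)
        else st) (s, t)
      = (s + ((l.filter (fun j => p i && p j)).map (f i)).sum,
         t + ((l.filter (fun j => !p i && !p j)).map (f i)).sum) := by
  induction l generalizing s t with
  | nil => simp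
  | cons a l ih =>
    rw [List.foldl_cons]
    cases hpi : p i <;> cases hpa : p a
    · simp only [hpi] at ih
      simp only [Bool.false_and, Bool.not_false, Bool.true_and, Bool.false_eq_true, if_false,
        List.filter_cons] at ih ⊢
      rw [ih]
      simp [hpa]
      ring
    · simp only [hpi] at ih
      simp only [Bool.false_and, Bool.not_false, Bool.true_and, Bool.and_false,
        Bool.false_eq_true, if_false, List.filter_cons] at ih ⊢
      rw [ih]
      simp [hpa]
    · simp only [hpi] at ih
      simp only [Bool.true_and, Bool.not_true, Bool.false_and, Bool.and_false,
        Bool.false_eq_true, if_false, List.filter_cons] at ih ⊢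
      rw [ih]
      simp [hpa]
    · simp only [hpi] at ih
      simp only [Bool.true_and, Bool.not_true, Bool.false_and, Bool.and_true,
        Bool.false_eq_true, if_false, if_true, List.filter_cons] at ih ⊢
      rw [ih]
      simp [hpa]
      ring

theorem pv_outerA (p : Int → Bool) (f : Int → Int → Int) (N : Int) :
    ∀ (k : Nat) (a : Int), (N - a).toNat = k → ∀ (s t : Int),
    (PySem.List.pyRange a N 1).foldl (fun (st : Int × Int) i =>
        (PySem.List.pyRange (i + 1) N 1).foldl (fun (st : Int × Int) j =>
          if p i && p j then (st.1 + f i j, st.2)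
          else if !p i && !p j then (st.1, st.2 + f i j)
          else st) st) (s, t)
      = (s + pvSpecSum f ((PySem.List.pyRange a N 1).filter p),
         t + pvSpecSum f ((PySem.List.pyRange a N 1).filter (fun i => !p i))) := by
  intro k
  induction k with
  | zero =>
    intro a ha s t
    have hNa : N ≤ a := by omega
    simp [PySem.List.pyRange_one_eq_nil hNa, pvSpecSum]
  | succ k ih =>
    intro a ha s t
    have haN : a < N := by omega
    rw [PySem.List.pyRange_one_cons haN]
    simp only [List.foldl_cons]
    rw [pv_innerA]
    rw [ih (a + 1) (by omega)]
    by_cases hp : p a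
    · simp only [List.filter_cons, hp, Bool.not_true, if_true]
      have h2 : (PySem.List.pyRange (a + 1) N 1).filter (fun j => p a && p j)
          = (PySem.List.pyRange (a + 1) N 1).filter p := by
        simp [hp]
      have h3 : (PySem.List.pyRange (a + 1) N 1).filter (fun j => !p a && !p j) = [] := by
        simp [hp]
      simp [pvSpecSum, h2, h3]
      ring
    · simp only [List.filter_cons, hp, Bool.not_false]
      have h2 : (PySem.List.pyRange (a + 1) N 1).filter (fun j => p a && p j) = [] := by
        simp [hp]
      have h3 : (PySem.List.pyRange (a + 1) N 1).filter (fun j => !p a && !p j)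
          = (PySem.List.pyRange (a + 1) N 1).filter (fun i => !p i) := by
        simp [hp]
      simp [pvSpecSum, h2, h3]
      ring

-- ===== VERDICT (by name: the statement is the Claim_ definition above) =====
theorem getAbility_spec : Claim_equal_getAbility := by
  intro visited S N _ _
  unfold Spec_getAbility getAbility getAbility_alt
  rw [pv_outerA (fun i => PySem.List.pyGetD visited i false)
      (fun a b => PySem.List.pyGetD (PySem.List.pyGetD S a []) b 0 + PySem.List.pyGetD (PySem.List.pyGetD S b []) a 0)
      N (N - 0).toNat 0 rfl 0 0]
  simp [pv_pairSum_eq]
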